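-- pv_equiv track=rewrite | github.com/zc12345/algorithm_and_ds | algorithm_comp/ch03-list_and_string/3-1_tex_quotes.py | tex_quotes
-- ===== SOURCE A (Python) =====
-- def tex_quotes(s):
--     '''UVa272 replace left quotes with tex quotes
--     Time: 2020/01/29 22:31:35
--     Args:
--         s: {str} input string
--     Returns:
--         res: {str} output string
--     '''
--     flag = True
--     res = []
--     for ch in s:
--         if ch == "\"":
--             if flag:
--                 ch = "``"
--             flag = not flag
--         res.append(ch)
--     return ''.join(res)
-- ===== SOURCE B (Python) =====
-- def tex_quotes(s):
--     parts = s.split('"')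
--     res = parts[0]
--     for i, part in enumerate(parts[1:], 1):
--         res += ('``' if i % 2 == 1 else '"') + part
--     return res
-- ===== Notes on version B (the rewrite author's own statement) =====
-- stated objective: faster
-- what changed: B splits the input at the quote characters once and rejoins the chunks with alternating separators (TeX backticks after odd-numbered cuts, the original quote after even-numbered ones), instead of A's character-by-character scan with a toggling flag and per-character list appends.
import Mathlib
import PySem

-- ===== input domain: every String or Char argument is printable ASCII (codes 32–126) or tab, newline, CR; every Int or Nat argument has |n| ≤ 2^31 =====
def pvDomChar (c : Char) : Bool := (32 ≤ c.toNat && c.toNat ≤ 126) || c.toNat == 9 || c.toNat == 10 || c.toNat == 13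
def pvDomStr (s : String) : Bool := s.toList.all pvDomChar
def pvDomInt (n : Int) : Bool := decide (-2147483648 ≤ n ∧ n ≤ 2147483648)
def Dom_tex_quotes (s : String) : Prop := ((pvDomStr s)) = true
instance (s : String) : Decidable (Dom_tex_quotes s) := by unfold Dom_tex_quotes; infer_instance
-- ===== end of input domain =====

-- B rejoins the chunks of s.split('"') with alternating separators instead of A's
-- character-by-character scan with a toggling flag (objective: alternative decomposition).

-- ===== PORT A =====
-- char-by-char scan: toggling flag, pieces appended to a list res, ''.join(res) at the end
def tex_quotes (s : String) : String :=
  let st := s.toList.foldl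
    (fun (acc : Bool × List (List Char)) ch =>
      if ch = '"' then
        (!acc.1, acc.2 ++ [if acc.1 then ['`', '`'] else [ch]])
      else
        (acc.1, acc.2 ++ [[ch]]))
    (true, ([] : List (List Char)))
  String.ofList (PySem.Chars.join [] st.2)

-- ===== PORT B =====
-- split at every quote; append '``' before odd-numbered chunks and '"' before even-numbered ones
def tex_quotes_alt (s : String) : String :=
  match PySem.Chars.splitOn s.toList ['"'] with
  | [] => ""   -- unreachable: split always yields at least one piece
  | p0 :: rest =>
    String.ofList ((PySem.List.enumerate rest 1).foldl
      (fun res ip =>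
        res ++ (if PySem.Int.mod ip.1 2 = 1 then ['`', '`'] else ['"']) ++ ip.2)
      p0)

-- ===== PRECONDITION & SPEC =====
def Spec_tex_quotes (s : String) (out : String) : Prop := out = tex_quotes_alt s
instance (s : String) (out : String) : Decidable (Spec_tex_quotes s out) := by unfold Spec_tex_quotes; infer_instance

-- ===== CLAIM (what is proved, stated in full; the proofs are below) =====
def Claim_equal_tex_quotes : Prop := ∀ (s : String), Dom_tex_quotes s → Spec_tex_quotes s (tex_quotes s)

-- ===== LEMMAS AND PROOFS =====

-- A's scan written as structural recursion (the flag f = "the next quote is an opening one")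
def texSpec (f : Bool) : List Char → List Char
  | [] => []
  | c :: t => if c = '"' then (if f then ['`', '`'] else ['"']) ++ texSpec (!f) t
              else c :: texSpec f t

-- split on '"' written as structural recursion
def qsplit : List Char → List (List Char)
  | [] => [[]]
  | c :: t =>
    if c = '"' then [] :: qsplit t
    else
      match qsplit t with
      | [] => [[c]]
      | p :: ps => (c :: p) :: ps

-- B's separator-alternating rejoin written as structural recursion
def altJoin (odd : Bool) : List (List Char) → List Char
  | [] => []
  | p :: ps => (if odd then ['`', '`'] else ['"']) ++ p ++ altJoin (!odd) ps

theorem join_nil_eq_flatten (ps : List (List Char)) :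
    PySem.Chars.join [] ps = ps.flatten := by
  induction ps with
  | nil => simp [PySem.Chars.join, List.intercalate]
  | cons p ps ih =>
    cases ps with
    | nil => simp [PySem.Chars.join, List.intercalate]
    | cons q qs =>
      rw [PySem.Chars.join_cons_cons] at *
      simp [ih]

-- A's foldl accumulates exactly texSpec
theorem tex_quotes_foldl (l : List Char) (f : Bool) (res : List (List Char)) :
    ((l.foldl
      (fun (acc : Bool × List (List Char)) ch =>
        if ch = '"' then
          (!acc.1, acc.2 ++ [if acc.1 then ['`', '`'] else [ch]])
        else
          (acc.1, acc.2 ++ [[ch]]))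
      (f, res)).2).flatten = res.flatten ++ texSpec f l := by
  induction l generalizing f res with
  | nil => simp [texSpec]
  | cons c t ih =>
    by_cases hc : c = '"'
    · subst hc
      simp only [List.foldl_cons, texSpec, ih]
      cases f <;> simp
    · simp only [List.foldl_cons, if_neg hc, texSpec, ih]
      simp

theorem qsplit_ne_nil (l : List Char) : qsplit l ≠ [] := by
  cases l with
  | nil => simp [qsplit]
  | cons c t =>
    simp only [qsplit]
    split_ifs
    · simp
    · cases h : qsplit t <;> simp

-- characterization of PySem's fuel-based splitOn at separator '"'
theorem splitOn_go_eq (l : List Char) : ∀ (fuel : Nat) (cur : List Char)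
    (acc : List (List Char)) (p : List Char) (ps : List (List Char)),
    qsplit l = p :: ps → l.length ≤ fuel →
    PySem.Chars.splitOn.go ['"'] fuel l cur acc =
      acc.reverse ++ (cur.reverse ++ p) :: ps := by
  induction l with
  | nil =>
    intro fuel cur acc p ps hq _
    simp only [qsplit] at hq
    cases hq
    cases fuel <;> simp [PySem.Chars.splitOn.go]
  | cons c t ih =>
    intro fuel cur acc p ps hq hf
    cases fuel with
    | zero => simp at hf
    | succ fuel =>
      obtain ⟨q, qs, hqt⟩ : ∃ q qs, qsplit t = q :: qs := by
        cases h : qsplit t with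
        | nil => exact absurd h (qsplit_ne_nil t)
        | cons a b => exact ⟨a, b, rfl⟩
      by_cases hc : c = '"'
      · subst hc
        have hq2 : ([] : List Char) :: q :: qs = p :: ps := by
          rw [← hq]; simp [qsplit, hqt]
        obtain ⟨rfl, rfl⟩ : ([] : List Char) = p ∧ q :: qs = ps :=
          ⟨by injection hq2, by injection hq2⟩
        have hstep : PySem.Chars.splitOn.go ['"'] (fuel+1) ('"' :: t) cur acc =
            PySem.Chars.splitOn.go ['"'] fuel t [] (cur.reverse :: acc) := by
          simp [PySem.Chars.splitOn.go, List.isPrefixOf]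
        rw [hstep, ih fuel [] (cur.reverse :: acc) q qs hqt (by simpa using hf)]
        simp
      · have hq2 : (c :: q) :: qs = p :: ps := by
          rw [← hq]; simp [qsplit, hc, hqt]
        obtain ⟨rfl, rfl⟩ : c :: q = p ∧ qs = ps :=
          ⟨by injection hq2, by injection hq2⟩
        have hstep : PySem.Chars.splitOn.go ['"'] (fuel+1) (c :: t) cur acc =
            PySem.Chars.splitOn.go ['"'] fuel t (c :: cur) acc := by
          simp [PySem.Chars.splitOn.go, List.isPrefixOf]
          intro h; exact absurd h.symm hc
        rw [hstep, ih fuel (c :: cur) acc q qs hqt (by simpa using hf)]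
        simp

theorem splitOn_eq_qsplit (l : List Char) :
    PySem.Chars.splitOn l ['"'] = qsplit l := by
  cases hq : qsplit l with
  | nil => exact absurd hq (qsplit_ne_nil l)
  | cons p ps =>
    unfold PySem.Chars.splitOn
    rw [splitOn_go_eq l (l.length + 1) [] [] p ps hq (Nat.le_succ _)]
    simp

theorem mod_two_flip (i : Int) :
    decide (PySem.Int.mod (i + 1) 2 = 1) = !decide (PySem.Int.mod i 2 = 1) := by
  rw [PySem.Int.mod_eq_emod_of_pos (by norm_num), PySem.Int.mod_eq_emod_of_pos (by norm_num)]
  by_cases h : i % 2 = 1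
  · simp [h]; omega
  · simp [h]; omega

-- B's enumerate-foldl accumulates exactly altJoin, keyed by the parity of the start index
theorem enumerate_foldl_altJoin (rest : List (List Char)) (i : Int) (res : List Char) :
    (PySem.List.enumerate rest i).foldl
      (fun res ip =>
        res ++ (if PySem.Int.mod ip.1 2 = 1 then ['`', '`'] else ['"']) ++ ip.2)
      res = res ++ altJoin (decide (PySem.Int.mod i 2 = 1)) rest := by
  induction rest generalizing i res with
  | nil => simp [PySem.List.enumerate, altJoin]
  | cons p ps ih =>
    rw [PySem.List.enumerate_cons, List.foldl_cons, ih, mod_two_flip]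
    by_cases h : PySem.Int.mod i 2 = 1
    · simp [altJoin]
    · simp [altJoin]

-- the bridge: A's scan equals the alternating rejoin of the quote-split
theorem texSpec_eq_altJoin (l : List Char) : ∀ (f : Bool) (p : List Char)
    (ps : List (List Char)), qsplit l = p :: ps →
    texSpec f l = p ++ altJoin f ps := by
  induction l with
  | nil =>
    intro f p ps hq
    simp only [qsplit] at hq
    cases hq
    simp [texSpec, altJoin]
  | cons c t ih =>
    intro f p ps hq
    obtain ⟨q, qs, hqt⟩ : ∃ q qs, qsplit t = q :: qs := by
      cases h : qsplit t with
      | nil => exact absurd h (qsplit_ne_nil t)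
      | cons a b => exact ⟨a, b, rfl⟩
    by_cases hc : c = '"'
    · subst hc
      have hq2 : ([] : List Char) :: q :: qs = p :: ps := by
        rw [← hq]; simp [qsplit, hqt]
      obtain ⟨rfl, rfl⟩ : ([] : List Char) = p ∧ q :: qs = ps :=
        ⟨by injection hq2, by injection hq2⟩
      rw [show texSpec f ('"' :: t) = (if f then ['`', '`'] else ['"']) ++ texSpec (!f) t
            from by simp [texSpec],
          ih (!f) q qs hqt]
      simp [altJoin]
    · have hq2 : (c :: q) :: qs = p :: ps := by
        rw [← hq]; simp [qsplit, hc, hqt]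
      obtain ⟨rfl, rfl⟩ : c :: q = p ∧ qs = ps :=
        ⟨by injection hq2, by injection hq2⟩
      rw [show texSpec f (c :: t) = c :: texSpec f t from by simp [texSpec, hc],
          ih f q qs hqt]
      simp

-- ===== VERDICT (by name: the statement is the Claim_ definition above) =====
theorem tex_quotes_spec : Claim_equal_tex_quotes := by
  intro s _
  unfold Spec_tex_quotes tex_quotes tex_quotes_alt
  rw [splitOn_eq_qsplit]
  cases hq : qsplit s.toList with
  | nil => exact absurd hq (qsplit_ne_nil s.toList)
  | cons p ps =>
    simp only [join_nil_eq_flatten]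
    have hA := tex_quotes_foldl s.toList true []
    simp only [List.flatten_nil, List.nil_append] at hA
    rw [hA, enumerate_foldl_altJoin, texSpec_eq_altJoin s.toList true p ps hq]
    norm_num
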